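-- pv_equiv track=rewrite | github.com/uglyswap/devora-saas-v2 | backend/routes_orchestration.py | detect_squad_type
-- ===== SOURCE A (Python) =====
-- from enum import Enum
--
-- class SquadType(str, Enum):
--     """Types de squads disponibles."""
--     BUSINESS = "business"
--     ENGINEERING = "engineering"
--     QA = "qa"
--     FULL_STACK = "full_stack"
--
-- def detect_squad_type(task_description: str) -> SquadType:
--     """
--     Auto-détecte le type de squad nécessaire basé sur la description.
--
--     Args:
--         task_description: Description de la tâche
--
--     Returns:
--         Type de squad le plus approprié
--     """
--     description_lower = task_description.lower()
--
--     # Keywords pour chaque squad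
--     business_keywords = ["product", "feature spec", "requirements", "user story", "business logic"]
--     engineering_keywords = ["code", "implement", "develop", "architecture", "api", "database"]
--     qa_keywords = ["test", "qa", "quality", "validation", "bug", "regression"]
--
--     # Score pour chaque squad
--     scores = {
--         SquadType.BUSINESS: sum(1 for kw in business_keywords if kw in description_lower),
--         SquadType.ENGINEERING: sum(1 for kw in engineering_keywords if kw in description_lower),
--         SquadType.QA: sum(1 for kw in qa_keywords if kw in description_lower),
--     }
--
--     # Si multiples squads sont nécessaires, utiliser full_stack
--     if sum(1 for score in scores.values() if score > 0) > 1: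
--         return SquadType.FULL_STACK
--
--     # Sinon prendre le plus haut score
--     return max(scores.items(), key=lambda x: x[1])[0] if max(scores.values()) > 0 else SquadType.ENGINEERING
-- ===== SOURCE B (Python) =====
-- from enum import Enum
--
-- class SquadType(str, Enum):
--     BUSINESS = "business"
--     ENGINEERING = "engineering"
--     QA = "qa"
--     FULL_STACK = "full_stack"
--
-- # Flat keyword -> squad table (inverted index), scanned once.
-- _KEYWORD_SQUAD = [
--     ("product", SquadType.BUSINESS), ("feature spec", SquadType.BUSINESS),
--     ("requirements", SquadType.BUSINESS), ("user story", SquadType.BUSINESS),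
--     ("business logic", SquadType.BUSINESS),
--     ("code", SquadType.ENGINEERING), ("implement", SquadType.ENGINEERING),
--     ("develop", SquadType.ENGINEERING), ("architecture", SquadType.ENGINEERING),
--     ("api", SquadType.ENGINEERING), ("database", SquadType.ENGINEERING),
--     ("test", SquadType.QA), ("qa", SquadType.QA), ("quality", SquadType.QA),
--     ("validation", SquadType.QA), ("bug", SquadType.QA), ("regression", SquadType.QA),
-- ]
--
-- def detect_squad_type(task_description: str) -> SquadType:
--     d = task_description.lower()
--     found = None
--     for kw, squad in _KEYWORD_SQUAD:
--         if kw in d: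
--             if found is None:
--                 found = squad
--             elif found is not squad:
--                 return SquadType.FULL_STACK
--     return found if found is not None else SquadType.ENGINEERING
-- ===== Notes on version B (the rewrite author's own statement) =====
-- stated objective: alternative
-- what changed: B inverts the data: instead of scoring three per-category keyword lists into a dict and selecting via a >1-nonzero count and max-with-key, it scans a single flat keyword->squad table once with a state-machine accumulator (none -> first matched squad -> early-return FULL_STACK on a match for a different squad), defaulting to ENGINEERING; exact because A diverts any multi-category match to FULL_STACK and never compares actual counts.
import Mathlib
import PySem

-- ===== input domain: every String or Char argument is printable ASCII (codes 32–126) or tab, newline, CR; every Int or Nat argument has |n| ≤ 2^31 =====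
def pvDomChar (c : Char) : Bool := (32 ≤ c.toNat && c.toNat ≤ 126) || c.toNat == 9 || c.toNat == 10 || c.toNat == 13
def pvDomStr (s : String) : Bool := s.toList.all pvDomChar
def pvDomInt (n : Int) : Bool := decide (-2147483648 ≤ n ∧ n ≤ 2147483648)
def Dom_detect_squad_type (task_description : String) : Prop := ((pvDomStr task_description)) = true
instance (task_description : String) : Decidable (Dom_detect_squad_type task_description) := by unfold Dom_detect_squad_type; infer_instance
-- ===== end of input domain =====

-- B replaces A's per-category score dict + count + max-with-key selection by one pass over a
-- flat keyword->squad table with a state-machine accumulator and early exit (alternative decomposition).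

-- ===== PORT A =====
def detect_squad_type (task_description : String) : String :=
  let description_lower := PySem.Str.lower task_description
  let business_keywords := ["product", "feature spec", "requirements", "user story", "business logic"]
  let engineering_keywords := ["code", "implement", "develop", "architecture", "api", "database"]
  let qa_keywords := ["test", "qa", "quality", "validation", "bug", "regression"]
  -- Python dict literal in insertion order, as an association list
  let scores : List (String × Int) :=
    [("business", (business_keywords.map (fun kw => if PySem.Str.isIn kw description_lower then (1:Int) else 0)).sum),
     ("engineering", (engineering_keywords.map (fun kw => if PySem.Str.isIn kw description_lower then (1:Int) else 0)).sum),
     ("qa", (qa_keywords.map (fun kw => if PySem.Str.isIn kw description_lower then (1:Int) else 0)).sum)]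
  if ((scores.map Prod.snd).map (fun score => if score > 0 then (1:Int) else 0)).sum > 1 then
    "full_stack"
  else
    -- max(scores.values()) and max(scores.items(), key=λx: x[1]); scores is a nonempty
    -- literal, so max? is always some and the .getD defaults are never used
    if ((PySem.List.max? (scores.map Prod.snd) (fun x => x)).getD 0) > 0 then
      ((PySem.List.max? scores (fun x => x.2)).getD ("engineering", 0)).1
    else "engineering"

-- ===== PORT B =====
-- the for-loop of Source B with its early `return SquadType.FULL_STACK`, as structural recursion
def pvAltLoop (d : String) : List (String × String) → Option String → String
  | [], found => match found with | some c => c | none => "engineering"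
  | (kw, squad) :: rest, found =>
      if PySem.Str.isIn kw d then
        match found with
        | none => pvAltLoop d rest (some squad)
        | some c => if c ≠ squad then "full_stack" else pvAltLoop d rest (some c)
      else pvAltLoop d rest found

def pvKeywordSquad : List (String × String) :=
  [("product","business"), ("feature spec","business"), ("requirements","business"),
   ("user story","business"), ("business logic","business"),
   ("code","engineering"), ("implement","engineering"), ("develop","engineering"),
   ("architecture","engineering"), ("api","engineering"), ("database","engineering"),
   ("test","qa"), ("qa","qa"), ("quality","qa"), ("validation","qa"),
   ("bug","qa"), ("regression","qa")]

def detect_squad_type_alt (task_description : String) : String :=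
  pvAltLoop (PySem.Str.lower task_description) pvKeywordSquad none

-- ===== PRECONDITION & SPEC =====
def Spec_detect_squad_type (task_description : String) (out : String) : Prop := out = detect_squad_type_alt task_description
instance (task_description : String) (out : String) : Decidable (Spec_detect_squad_type task_description out) := by unfold Spec_detect_squad_type; infer_instance

-- ===== CLAIM (what is proved, stated in full; the proofs are below) =====
def Claim_equal_detect_squad_type : Prop := ∀ (task_description : String), Dom_detect_squad_type task_description → Spec_detect_squad_type task_description (detect_squad_type task_description)

-- ===== LEMMAS AND PROOFS =====

-- a maximal single-category segment of the table collapses to one step of the state machine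
theorem pvAltLoop_seg (d c : String) (kws : List String) (rest : List (String × String)) (found : Option String) :
    pvAltLoop d (kws.map (fun k => (k, c)) ++ rest) found =
      if kws.any (fun k => PySem.Str.isIn k d) then
        match found with
        | none => pvAltLoop d rest (some c)
        | some c' => if c' ≠ c then "full_stack" else pvAltLoop d rest (some c')
      else pvAltLoop d rest found := by
  induction kws generalizing found with
  | nil => cases found <;> simp
  | cons k kws ih =>
    rcases h : PySem.Str.isIn k d with _ | _ <;> rcases found with _ | c' <;>
      simp only [List.map_cons, List.cons_append, pvAltLoop, List.any_cons, h, Bool.false_or,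
        Bool.true_or, Bool.false_eq_true, if_false, if_true, ih] <;>
      (first | rfl | (split_ifs <;> simp_all))

-- the whole flat-table scan in terms of the three per-category any-conditions
theorem pvAlt_eval (d : String) :
    pvAltLoop d pvKeywordSquad none =
      (if ["product", "feature spec", "requirements", "user story", "business logic"].any
            (fun k => PySem.Str.isIn k d) then
         if ["code", "implement", "develop", "architecture", "api", "database"].any
            (fun k => PySem.Str.isIn k d) then "full_stack"
         else if ["test", "qa", "quality", "validation", "bug", "regression"].any
            (fun k => PySem.Str.isIn k d) then "full_stack" else "business"
       else if ["code", "implement", "develop", "architecture", "api", "database"].any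
            (fun k => PySem.Str.isIn k d) then
         if ["test", "qa", "quality", "validation", "bug", "regression"].any
            (fun k => PySem.Str.isIn k d) then "full_stack" else "engineering"
       else if ["test", "qa", "quality", "validation", "bug", "regression"].any
            (fun k => PySem.Str.isIn k d) then "qa" else "engineering") := by
  have htab : pvKeywordSquad =
      (["product", "feature spec", "requirements", "user story", "business logic"].map
         (fun k => (k, "business")) ++
       ((["code", "implement", "develop", "architecture", "api", "database"].map
         (fun k => (k, "engineering"))) ++
        ((["test", "qa", "quality", "validation", "bug", "regression"].map
         (fun k => (k, "qa"))) ++ []))) := by rfl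
  rw [htab]
  simp only [pvAltLoop_seg]
  split_ifs <;> simp_all [pvAltLoop]

-- max(xs) over a 3-element literal, written out as nested comparisons (first extremal wins)
theorem pv_max3_val (a b c : Int) :
    (PySem.List.max? [a, b, c] (fun x => x)).getD 0 =
      if a < b then (if b < c then c else b) else (if a < c then c else a) := by
  by_cases h1 : a < b <;> by_cases h2 : b < c <;> by_cases h3 : a < c <;>
    simp [PySem.List.max?, List.foldl, h1, h2, h3]

-- max(items, key=snd) over a 3-element literal, projected to the label
theorem pv_max3_items (la lb lc : String) (a b c : Int) :
    ((PySem.List.max? [(la, a), (lb, b), (lc, c)] (fun x => x.2)).getD ("engineering", 0)).1 =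
      if a < b then (if b < c then lc else lb) else (if a < c then lc else la) := by
  by_cases h1 : a < b <;> by_cases h2 : b < c <;> by_cases h3 : a < c <;>
    simp [PySem.List.max?, List.foldl, h1, h2, h3]

-- ===== VERDICT (by name: the statement is the Claim_ definition above) =====
set_option maxHeartbeats 2000000 in
theorem detect_squad_type_spec : Claim_equal_detect_squad_type := by
  intro s _
  show detect_squad_type s = detect_squad_type_alt s
  simp only [detect_squad_type, detect_squad_type_alt, pvAlt_eval]
  simp only [List.map_cons, List.map_nil, List.sum_cons, List.sum_nil, List.any_cons,
    List.any_nil, pv_max3_val, pv_max3_items]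
  set L := PySem.Str.lower s with hL
  set x1 := PySem.Str.isIn "product" L with h1
  set x2 := PySem.Str.isIn "feature spec" L with h2
  set x3 := PySem.Str.isIn "requirements" L with h3
  set x4 := PySem.Str.isIn "user story" L with h4
  set x5 := PySem.Str.isIn "business logic" L with h5
  set y1 := PySem.Str.isIn "code" L with g1
  set y2 := PySem.Str.isIn "implement" L with g2
  set y3 := PySem.Str.isIn "develop" L with g3
  set y4 := PySem.Str.isIn "architecture" L with g4
  set y5 := PySem.Str.isIn "api" L with g5
  set y6 := PySem.Str.isIn "database" L with g6
  set z1 := PySem.Str.isIn "test" L with k1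
  set z2 := PySem.Str.isIn "qa" L with k2
  set z3 := PySem.Str.isIn "quality" L with k3
  set z4 := PySem.Str.isIn "validation" L with k4
  set z5 := PySem.Str.isIn "bug" L with k5
  set z6 := PySem.Str.isIn "regression" L with k6
  set Sb := (if x1 = true then (1:Int) else 0) + ((if x2 = true then (1:Int) else 0) +
    ((if x3 = true then (1:Int) else 0) + ((if x4 = true then (1:Int) else 0) +
    ((if x5 = true then (1:Int) else 0) + 0)))) with hSb
  set Se := (if y1 = true then (1:Int) else 0) + ((if y2 = true then (1:Int) else 0) +
    ((if y3 = true then (1:Int) else 0) + ((if y4 = true then (1:Int) else 0) +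
    ((if y5 = true then (1:Int) else 0) + ((if y6 = true then (1:Int) else 0) + 0))))) with hSe
  set Sq := (if z1 = true then (1:Int) else 0) + ((if z2 = true then (1:Int) else 0) +
    ((if z3 = true then (1:Int) else 0) + ((if z4 = true then (1:Int) else 0) +
    ((if z5 = true then (1:Int) else 0) + ((if z6 = true then (1:Int) else 0) + 0))))) with hSq
  have hbIff : 0 < Sb ↔ (x1 || (x2 || (x3 || (x4 || (x5 || false))))) = true := by
    rw [hSb]; cases x1 <;> cases x2 <;> cases x3 <;> cases x4 <;> cases x5 <;> simp
  have heIff : 0 < Se ↔ (y1 || (y2 || (y3 || (y4 || (y5 || (y6 || false)))))) = true := by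
    rw [hSe]; cases y1 <;> cases y2 <;> cases y3 <;> cases y4 <;> cases y5 <;> cases y6 <;> simp
  have hqIff : 0 < Sq ↔ (z1 || (z2 || (z3 || (z4 || (z5 || (z6 || false)))))) = true := by
    rw [hSq]; cases z1 <;> cases z2 <;> cases z3 <;> cases z4 <;> cases z5 <;> cases z6 <;> simp
  clear_value Sb Se Sq
  rcases Bool.eq_false_or_eq_true (x1 || (x2 || (x3 || (x4 || (x5 || false))))) with hab | hab <;>
  rcases Bool.eq_false_or_eq_true (y1 || (y2 || (y3 || (y4 || (y5 || (y6 || false)))))) with hae | hae <;>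
  rcases Bool.eq_false_or_eq_true (z1 || (z2 || (z3 || (z4 || (z5 || (z6 || false)))))) with haq | haq <;>
    simp only [hab, hae, haq, iff_true, Bool.false_eq_true, iff_false, not_lt] at hbIff heIff hqIff <;>
    simp only [hab, hae, haq, if_true, if_false, Bool.false_eq_true, pvAltLoop, ne_eq,
      String.reduceEq, not_false_eq_true] <;>
    (try split_ifs) <;> first | rfl | omega | simp_all
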